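-- pv_equiv track=rewrite | github.com/Spacider/comp6714_asmt | project_part1.py | sorting_same_score
-- ===== SOURCE A (Python) =====
-- def docID(posting):
--     return posting[0]
--
-- def sorting_same_score(topk_result):
--     # if have same score swap
--     dict = {}
--     for index in topk_result:
--         dict.setdefault(docID(index), []).append(index)
--
--     new_top_result = []
--     for key in dict.keys():
--         values = dict.get(key)
--         if len(values) == 1:
--             new_top_result.extend(values)
--         elif len(values) > 1:
--             new_top_result.extend(sorted(values, key=lambda x: x[1]))
--
--     return new_top_result
-- ===== SOURCE B (Python) =====
-- def sorting_same_score(topk_result):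
--     # one pass recording each docID's first-appearance index, then one global stable sort
--     first_idx = {}
--     for i, p in enumerate(topk_result):
--         first_idx.setdefault(p[0], i)
--     return sorted(topk_result, key=lambda x: (first_idx[x[0]], x[1]))
-- ===== Notes on version B (the rewrite author's own statement) =====
-- stated objective: simpler
-- what changed: Replaces the dict-of-lists grouping plus per-bucket sorting loop by one pass recording each docID's first-appearance index followed by a single global stable sort keyed by (first index, score).
import Mathlib
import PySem

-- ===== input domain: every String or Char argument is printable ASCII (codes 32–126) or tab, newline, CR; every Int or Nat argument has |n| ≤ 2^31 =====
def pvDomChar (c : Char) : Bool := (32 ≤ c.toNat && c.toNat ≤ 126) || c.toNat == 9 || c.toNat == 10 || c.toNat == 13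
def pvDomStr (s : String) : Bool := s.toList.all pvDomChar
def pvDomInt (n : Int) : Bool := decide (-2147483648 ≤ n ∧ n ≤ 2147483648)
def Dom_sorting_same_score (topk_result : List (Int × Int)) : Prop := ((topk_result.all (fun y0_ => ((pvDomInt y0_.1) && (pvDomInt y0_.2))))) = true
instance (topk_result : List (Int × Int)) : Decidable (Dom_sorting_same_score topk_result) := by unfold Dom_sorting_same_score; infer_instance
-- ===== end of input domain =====

-- B replaces A's dict-of-lists buckets (each bucket sorted separately) by one first-appearance-index pass plus a single global stable sort.

-- ===== PORT A =====
def docID (posting : Int × Int) : Int := posting.1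

def sorting_same_score (topk_result : List (Int × Int)) : List (Int × Int) :=
  let d := topk_result.foldl (fun d index => d.modify (docID index) [] (· ++ [index])) PySem.Dict.empty
  d.keys.foldl (fun acc key =>
    -- dict.get(key): key always present, so the none branch is unreachable; getD [] is exact here
    let values := (d.get? key).getD []
    if values.length = 1 then acc ++ values
    else if values.length > 1 then acc ++ PySem.List.sorted values (fun x => x.2) false
    else acc) []

-- ===== PORT B =====
def sorting_same_score_alt (topk_result : List (Int × Int)) : List (Int × Int) :=
  let first_idx := (PySem.List.enumerate topk_result 0).foldl
    (fun d ip => d.setdefault ip.2.1 ip.1) PySem.Dict.empty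
  -- first_idx[x[0]] always hits (every x.1 was recorded), so getD's default is never used; exact
  PySem.List.sorted2 topk_result (fun x => first_idx.getD x.1 0) (fun x => x.2) false

-- ===== PRECONDITION & SPEC =====
def Spec_sorting_same_score (topk_result : List (Int × Int)) (out : List (Int × Int)) : Prop := out = sorting_same_score_alt topk_result
instance (topk_result : List (Int × Int)) (out : List (Int × Int)) : Decidable (Spec_sorting_same_score topk_result out) := by unfold Spec_sorting_same_score; infer_instance

-- ===== CLAIM (what is proved, stated in full; the proofs are below) =====
def Claim_equal_sorting_same_score : Prop := ∀ (topk_result : List (Int × Int)), Dom_sorting_same_score topk_result → Spec_sorting_same_score topk_result (sorting_same_score topk_result)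

-- ===== LEMMAS AND PROOFS =====

-- insertBy unfolding
theorem insertBy_nil {α : Type} (before : α → α → Bool) (x : α) :
    PySem.List.insertBy before x [] = [x] := rfl

theorem insertBy_cons {α : Type} (before : α → α → Bool) (x y : α) (ys : List α) :
    PySem.List.insertBy before x (y :: ys) =
      if before x y then x :: y :: ys else y :: PySem.List.insertBy before x ys := rfl

theorem insertBy_all {α : Type} (before : α → α → Bool) (x : α) (S : List α)
    (h : ∀ s ∈ S, before x s = true) : PySem.List.insertBy before x S = x :: S := by
  cases S with
  | nil => rfl
  | cons s S => rw [insertBy_cons, h s (List.mem_cons_self ..)]; simp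

theorem insertBy_skip {α : Type} (before : α → α → Bool) (x : α) (l t : List α)
    (h : ∀ y ∈ l, before x y = false) :
    PySem.List.insertBy before x (l ++ t) = l ++ PySem.List.insertBy before x t := by
  induction l with
  | nil => rfl
  | cons y l ih =>
      rw [List.cons_append, insertBy_cons, h y (List.mem_cons_self ..)]
      simp only [Bool.false_eq_true, if_false, List.cons_append, List.cons.injEq, true_and]
      exact ih (fun z hz => h z (List.mem_cons_of_mem _ hz))

theorem insertBy_block {α : Type} (before b2 : α → α → Bool) (x : α) (B S : List α)
    (hB : ∀ y ∈ B, before x y = b2 x y) (hS : ∀ s ∈ S, before x s = true) :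
    PySem.List.insertBy before x (B ++ S) = PySem.List.insertBy b2 x B ++ S := by
  induction B with
  | nil => simp [insertBy_all before x S hS, insertBy_nil]
  | cons y B ih =>
      rw [List.cons_append, insertBy_cons, insertBy_cons, hB y (List.mem_cons_self ..)]
      by_cases h : b2 x y
      · simp [h]
      · have h' : b2 x y = false := by simpa using h
        rw [h']
        simp only [Bool.false_eq_true, if_false]
        rw [List.cons_append, ih (fun z hz => hB z (List.mem_cons_of_mem _ hz))]

theorem sorted_nil {α : Type} (key : α → Int) : PySem.List.sorted [] key false = [] := rfl

theorem sorted_snoc {α : Type} (l : List α) (x : α) (key : α → Int) :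
    PySem.List.sorted (l ++ [x]) key false =
      PySem.List.insertBy (fun a b => decide (key a < key b)) x (PySem.List.sorted l key false) := by
  rw [PySem.List.sorted_eq_foldl_insertBy, PySem.List.sorted_eq_foldl_insertBy, List.foldl_append]
  rfl

theorem sorted2_nil {α : Type} (k1 k2 : α → Int) : PySem.List.sorted2 [] k1 k2 false = [] := rfl

theorem sorted2_snoc {α : Type} (l : List α) (x : α) (k1 k2 : α → Int) :
    PySem.List.sorted2 (l ++ [x]) k1 k2 false =
      PySem.List.insertBy
        (fun a b => decide (k1 a < k1 b) || (!decide (k1 b < k1 a) && decide (k2 a < k2 b)))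
        x (PySem.List.sorted2 l k1 k2 false) := by
  simp [PySem.List.sorted2, List.foldl_append]

theorem flatMap_congr_mem {α β : Type} (l : List α) (f g : α → List β)
    (h : ∀ a ∈ l, f a = g a) : l.flatMap f = l.flatMap g := by
  induction l with
  | nil => rfl
  | cons a l ih =>
      simp only [List.flatMap_cons, h a (List.mem_cons_self ..)]
      rw [ih (fun b hb => h b (List.mem_cons_of_mem _ hb))]

-- MAIN: a stable sort on the lexicographic key (k1, k2), with the k1-classes listed by K in
-- strictly increasing order, is the concatenation of the k2-sorted k1-fibers.
theorem sorted2_eq_flatMap {α : Type} (k1 k2 : α → Int) (xs : List α) (K : List Int)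
    (hK : K.Pairwise (· < ·)) (hmem : ∀ p ∈ xs, k1 p ∈ K) :
    PySem.List.sorted2 xs k1 k2 false
      = K.flatMap (fun v => PySem.List.sorted (xs.filter (fun p => k1 p == v)) (fun x => k2 x) false) := by
  induction xs using List.reverseRecOn with
  | nil =>
      rw [sorted2_nil]
      have h0 : ∀ v ∈ K, PySem.List.sorted (List.filter (fun p => k1 p == v) []) (fun x => k2 x) false = ([] : List α) :=
        fun v _ => rfl
      rw [flatMap_congr_mem K _ _ h0]
      simp
  | append_singleton xs p ih =>
      have hv0 : k1 p ∈ K := hmem p (by simp)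
      obtain ⟨K1, K2, rfl⟩ := List.append_of_mem hv0
      have hpw := hK
      rw [List.pairwise_append] at hpw
      obtain ⟨hpw1, hpw2, hcross⟩ := hpw
      rw [List.pairwise_cons] at hpw2
      have hlt1 : ∀ v ∈ K1, v < k1 p := fun v hv => hcross v hv (k1 p) (List.mem_cons_self ..)
      have hgt2 : ∀ v ∈ K2, k1 p < v := hpw2.1
      have ihmem : ∀ q ∈ xs, k1 q ∈ K1 ++ k1 p :: K2 := fun q hq => hmem q (by simp [hq])
      rw [sorted2_snoc, ih ihmem]
      simp only [List.flatMap_append, List.flatMap_cons]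
      have hskip : ∀ y ∈ (List.flatMap (fun v => PySem.List.sorted (List.filter (fun q => k1 q == v) xs) (fun x => k2 x) false) K1),
          (fun a b => decide (k1 a < k1 b) || (!decide (k1 b < k1 a) && decide (k2 a < k2 b))) p y = false := by
        intro y hy
        rw [List.mem_flatMap] at hy
        obtain ⟨v, hv, hyv⟩ := hy
        rw [PySem.List.mem_sorted] at hyv
        have hk : k1 y = v := by simpa using List.of_mem_filter hyv
        have hvlt := hlt1 v hv
        show (decide (k1 p < k1 y) || (!decide (k1 y < k1 p) && decide (k2 p < k2 y))) = false
        rw [hk, decide_eq_false (by omega : ¬ (k1 p < v)), decide_eq_true (by omega : v < k1 p)]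
        rfl
      have hfib : ∀ y ∈ PySem.List.sorted (List.filter (fun q => k1 q == k1 p) xs) (fun x => k2 x) false,
          (fun a b => decide (k1 a < k1 b) || (!decide (k1 b < k1 a) && decide (k2 a < k2 b))) p y
            = (fun a b => decide (k2 a < k2 b)) p y := by
        intro y hy
        rw [PySem.List.mem_sorted] at hy
        have hk : k1 y = k1 p := by simpa using List.of_mem_filter hy
        show (decide (k1 p < k1 y) || (!decide (k1 y < k1 p) && decide (k2 p < k2 y))) = decide (k2 p < k2 y)
        rw [hk, decide_eq_false (lt_irrefl (k1 p))]
        rfl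
      have hgtS : ∀ s ∈ (List.flatMap (fun v => PySem.List.sorted (List.filter (fun q => k1 q == v) xs) (fun x => k2 x) false) K2),
          (fun a b => decide (k1 a < k1 b) || (!decide (k1 b < k1 a) && decide (k2 a < k2 b))) p s = true := by
        intro s hs
        rw [List.mem_flatMap] at hs
        obtain ⟨v, hv, hsv⟩ := hs
        rw [PySem.List.mem_sorted] at hsv
        have hk : k1 s = v := by simpa using List.of_mem_filter hsv
        have hvgt := hgt2 v hv
        show (decide (k1 p < k1 s) || (!decide (k1 s < k1 p) && decide (k2 p < k2 s))) = true
        rw [hk, decide_eq_true (by omega : k1 p < v)]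
        rfl
      rw [insertBy_skip _ p _ _ hskip,
        insertBy_block _ (fun a b => decide (k2 a < k2 b)) p _ _ hfib hgtS]
      have e1 : ∀ v ∈ K1,
          PySem.List.sorted (List.filter (fun q => k1 q == v) (xs ++ [p])) (fun x => k2 x) false
            = PySem.List.sorted (List.filter (fun q => k1 q == v) xs) (fun x => k2 x) false := by
        intro v hv
        have hne : (k1 p == v) = false := beq_eq_false_iff_ne.mpr (by have := hlt1 v hv; omega)
        rw [List.filter_append]; simp [hne]
      have e2 : ∀ v ∈ K2,
          PySem.List.sorted (List.filter (fun q => k1 q == v) (xs ++ [p])) (fun x => k2 x) false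
            = PySem.List.sorted (List.filter (fun q => k1 q == v) xs) (fun x => k2 x) false := by
        intro v hv
        have hne : (k1 p == v) = false := beq_eq_false_iff_ne.mpr (by have := hgt2 v hv; omega)
        rw [List.filter_append]; simp [hne]
      have e0 : List.filter (fun q => k1 q == k1 p) (xs ++ [p])
          = List.filter (fun q => k1 q == k1 p) xs ++ [p] := by
        rw [List.filter_append]; simp
      rw [flatMap_congr_mem K1 _ _ e1, flatMap_congr_mem K2 _ _ e2, e0, sorted_snoc]

-- index? facts
theorem index?_cons_self {α : Type} [BEq α] [LawfulBEq α] (x : α) (m : List α) :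
    PySem.List.index? (x :: m) x = some 0 := by
  simp [PySem.List.index?_eq_idxOf?, List.idxOf?, List.findIdx?_cons]

theorem index?_isSome_of_mem {α : Type} [BEq α] [LawfulBEq α] {m : List α} {a : α} (h : a ∈ m) :
    ∃ k, PySem.List.index? m a = some k := by
  induction m with
  | nil => simp at h
  | cons y m ih =>
      by_cases hy : y = a
      · subst hy; exact ⟨0, index?_cons_self y m⟩
      · rcases List.mem_cons.mp h with h1 | h2
        · exact absurd h1.symm hy
        · obtain ⟨k, hk⟩ := ih h2
          exact ⟨k + 1, by rw [PySem.List.index?_cons_of_ne m hy, hk]; rfl⟩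

theorem index?_getD_inj {m : List Int} {a b : Int} (ha : a ∈ m) (hb : b ∈ m)
    (h : (PySem.List.index? m a).getD 0 = (PySem.List.index? m b).getD 0) : a = b := by
  obtain ⟨ka, hka⟩ := index?_isSome_of_mem ha
  obtain ⟨kb, hkb⟩ := index?_isSome_of_mem hb
  rw [hka, hkb] at h
  simp at h
  subst h
  obtain ⟨hlt, hea, -⟩ := PySem.List.getElem_of_index?_eq_some hka
  obtain ⟨hlt2, heb, -⟩ := PySem.List.getElem_of_index?_eq_some hkb
  rw [← hea, ← heb]

-- dedup structure and first-index monotonicity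
theorem dedup_cons (x : Int) (m : List Int) :
    PySem.List.dedup (x :: m) = x :: (PySem.List.dedup m).filter (fun y => !(y == x)) := by
  have h1 : PySem.List.dedup (x :: m) = PySem.Set.update ([x] : PySem.Set Int) m := by
    rw [PySem.List.dedup_eq_ofList]; rfl
  rw [h1, PySem.Set.update_eq_append_filter]
  simp only [List.singleton_append, ← PySem.List.dedup_eq_ofList, List.cons.injEq, true_and]
  apply List.filter_congr
  intro y _
  by_cases h : y = x <;> simp [PySem.Set.contains, h]

theorem dedup_idx_pairwise : ∀ (m : List Int),
    (PySem.List.dedup m).Pairwise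
      (fun a b => (PySem.List.index? m a).getD 0 < (PySem.List.index? m b).getD 0)
  | [] => List.Pairwise.nil
  | x :: m => by
      rw [dedup_cons]
      constructor
      · intro b hb
        have hbm : b ∈ PySem.List.dedup m := (List.mem_filter.mp hb).1
        have hbne : b ≠ x := by have := (List.mem_filter.mp hb).2; simpa using this
        have hbmem : b ∈ m := (PySem.List.mem_dedup m b).mp hbm
        obtain ⟨k, hk⟩ := index?_isSome_of_mem hbmem
        rw [index?_cons_self, PySem.List.index?_cons_of_ne m (Ne.symm hbne), hk]
        simp
      · have IH := dedup_idx_pairwise m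
        have hsub : ((PySem.List.dedup m).filter (fun y => !(y == x))).Pairwise
            (fun a b => (PySem.List.index? m a).getD 0 < (PySem.List.index? m b).getD 0) :=
          IH.sublist List.filter_sublist
        refine List.Pairwise.imp_of_mem ?_ hsub
        intro a b ha hb hab
        have hane : a ≠ x := by have := (List.mem_filter.mp ha).2; simpa using this
        have hbne : b ≠ x := by have := (List.mem_filter.mp hb).2; simpa using this
        have ham : a ∈ m := (PySem.List.mem_dedup m a).mp (List.mem_filter.mp ha).1
        have hbm : b ∈ m := (PySem.List.mem_dedup m b).mp (List.mem_filter.mp hb).1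
        obtain ⟨ka, hka⟩ := index?_isSome_of_mem ham
        obtain ⟨kb, hkb⟩ := index?_isSome_of_mem hbm
        rw [hka, hkb] at hab
        rw [PySem.List.index?_cons_of_ne m (Ne.symm hane),
          PySem.List.index?_cons_of_ne m (Ne.symm hbne), hka, hkb]
        simpa using hab

-- the first-appearance dict of B
theorem fi_get? : ∀ (ts : List (Int × Int)) (s : Int) (d : PySem.Dict Int Int) (x : Int),
    ((PySem.List.enumerate ts s).foldl (fun d ip => d.setdefault ip.2.1 ip.1) d).get? x
      = (d.get? x).or ((PySem.List.index? (ts.map (·.1)) x).map (fun (n : Nat) => s + (n : Int)))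
  | [], s, d, x => by
      rw [PySem.List.enumerate_nil]
      simp [PySem.List.index?_eq_idxOf?]
  | p :: ts, s, d, x => by
      rw [PySem.List.enumerate_cons, List.foldl_cons, fi_get? ts (s + 1) (d.setdefault p.1 s) x]
      by_cases hx : x = p.1
      · rw [hx, PySem.Dict.get?_setdefault_self d p.1 s, List.map_cons, index?_cons_self]
        cases hd : d.get? p.1 with
        | none => simp [Option.or]
        | some v => simp [Option.or]
      · rw [PySem.Dict.get?_setdefault_of_ne d s hx, List.map_cons,
          PySem.List.index?_cons_of_ne _ (fun h => hx h.symm)]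
        cases hi : PySem.List.index? (ts.map (·.1)) x with
        | none => simp
        | some k =>
            simp only [Option.map_some]
            have hc : s + 1 + (k : Int) = s + ((k + 1 : Nat) : Int) := by push_cast; ring
            rw [hc]

theorem fi_getD (ts : List (Int × Int)) (a : Int) :
    ((PySem.List.enumerate ts 0).foldl (fun d ip => d.setdefault ip.2.1 ip.1) PySem.Dict.empty).getD a 0
      = (((PySem.List.index? (ts.map (·.1)) a).getD 0 : Nat) : Int) := by
  have h0 : (PySem.Dict.empty : PySem.Dict Int Int).get? a = none := rfl
  have h := fi_get? ts 0 PySem.Dict.empty a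
  show (((PySem.List.enumerate ts 0).foldl (fun d ip => d.setdefault ip.2.1 ip.1) PySem.Dict.empty).get? a).getD 0 = _
  rw [h, h0]
  cases hi : PySem.List.index? (ts.map (·.1)) a <;> simp [Option.or]

-- characterization of A: fibers of the grouping dict, keys in first-appearance order
theorem groupD_getD : ∀ (l : List (Int × Int)) (d : PySem.Dict Int (List (Int × Int))) (c : Int),
    (l.foldl (fun d index => d.modify (docID index) [] (· ++ [index])) d).getD c []
      = d.getD c [] ++ l.filter (fun p => p.1 == c)
  | [], d, c => by simp
  | p :: l, d, c => by
      rw [List.foldl_cons, groupD_getD l _ c]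
      by_cases hc : c = p.1
      · rw [hc]
        rw [show (PySem.Dict.modify d (docID p) [] (· ++ [p])).getD p.1 []
            = d.getD p.1 [] ++ [p] from PySem.Dict.getD_modify_self d p.1 [] _]
        simp
      · rw [PySem.Dict.getD_modify, if_neg (show ¬ c = docID p from hc)]
        have : (p.1 == c) = false := beq_eq_false_iff_ne.mpr (fun h => hc h.symm)
        simp [this]

theorem groupD_keys (ts : List (Int × Int)) :
    (ts.foldl (fun d index => d.modify (docID index) [] (· ++ [index])) (PySem.Dict.empty : PySem.Dict Int (List (Int × Int)))).keys
      = PySem.List.dedup (ts.map (·.1)) := by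
  have h := PySem.Dict.keys_foldl_modify_key ts docID ([] : List (Int × Int))
    (fun _ index => (· ++ [index])) (PySem.Dict.empty : PySem.Dict Int (List (Int × Int)))
  rw [show (fun (d : PySem.Dict Int (List (Int × Int))) (x : Int × Int) =>
      d.modify (docID x) [] ((fun _ index => (· ++ [index])) d x))
      = (fun (d : PySem.Dict Int (List (Int × Int))) (index : Int × Int) =>
      d.modify (docID index) [] (· ++ [index])) from rfl] at h
  rw [h]
  rw [show (PySem.Dict.empty : PySem.Dict Int (List (Int × Int))).keys = ([] : PySem.Set Int) from rfl]
  rw [PySem.Set.update_eq_append_filter]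
  simp only [List.nil_append, ← PySem.List.dedup_eq_ofList]
  rw [show ts.map docID = ts.map (·.1) from rfl]
  rw [List.filter_eq_self.mpr]
  intro y _
  simp [PySem.Set.contains]

theorem branch_eq (l acc : List (Int × Int)) :
    (if l.length = 1 then acc ++ l
     else if l.length > 1 then acc ++ PySem.List.sorted l (fun x => x.2) false
     else acc)
      = acc ++ PySem.List.sorted l (fun x => x.2) false := by
  match l with
  | [] => simp [sorted_nil]
  | [a] =>
      rw [if_pos (by simp : ([a] : List (Int × Int)).length = 1),
        PySem.List.sorted_eq_self_of_pairwise [a] (fun x => x.2) (List.pairwise_singleton _ _)]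
  | a :: b :: l =>
      rw [if_neg (by simp), if_pos (by simp)]

theorem charA (ts : List (Int × Int)) :
    sorting_same_score ts
      = (PySem.List.dedup (ts.map (·.1))).flatMap
          (fun k => PySem.List.sorted (ts.filter (fun p => p.1 == k)) (fun x => x.2) false) := by
  show (ts.foldl (fun d index => d.modify (docID index) [] (· ++ [index])) PySem.Dict.empty).keys.foldl
      (fun acc key =>
        let values := ((ts.foldl (fun d index => d.modify (docID index) [] (· ++ [index])) PySem.Dict.empty).get? key).getD []
        if values.length = 1 then acc ++ values
        else if values.length > 1 then acc ++ PySem.List.sorted values (fun x => x.2) false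
        else acc) []
      = _
  rw [PySem.List.foldl_congr_mem _ _
    (fun acc key => acc ++ PySem.List.sorted (ts.filter (fun p => p.1 == key)) (fun x => x.2) false) [] ?_]
  · rw [PySem.List.foldl_append_eq_flatMap, groupD_keys, List.nil_append]
  · intro acc key _
    show (if (((ts.foldl (fun d index => d.modify (docID index) [] (· ++ [index])) PySem.Dict.empty).get? key).getD []).length = 1
        then acc ++ ((ts.foldl (fun d index => d.modify (docID index) [] (· ++ [index])) PySem.Dict.empty).get? key).getD []
        else _) = _
    rw [show ((ts.foldl (fun d index => d.modify (docID index) [] (· ++ [index])) PySem.Dict.empty).get? key).getD []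
        = (ts.foldl (fun d index => d.modify (docID index) [] (· ++ [index])) PySem.Dict.empty).getD key [] from rfl]
    rw [groupD_getD ts PySem.Dict.empty key]
    rw [show (PySem.Dict.empty : PySem.Dict Int (List (Int × Int))).getD key [] = [] from rfl, List.nil_append]
    exact branch_eq _ acc

theorem charB (ts : List (Int × Int)) :
    sorting_same_score_alt ts
      = PySem.List.sorted2 ts
          (fun x => ((PySem.List.enumerate ts 0).foldl (fun d ip => d.setdefault ip.2.1 ip.1) PySem.Dict.empty).getD x.1 0)
          (fun x => x.2) false := rfl

-- ===== VERDICT (by name: the statement is the Claim_ definition above) =====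
theorem sorting_same_score_spec : Claim_equal_sorting_same_score := by
  intro ts _
  unfold Spec_sorting_same_score
  rw [charA, charB]
  have hk1 : ∀ x : Int × Int,
      ((PySem.List.enumerate ts 0).foldl (fun d ip => d.setdefault ip.2.1 ip.1) PySem.Dict.empty).getD x.1 0
        = (((PySem.List.index? (ts.map (·.1)) x.1).getD 0 : Nat) : Int) := fun x => fi_getD ts x.1
  rw [sorted2_eq_flatMap _ (fun x => x.2) ts
    ((PySem.List.dedup (ts.map (·.1))).map (fun a => (((PySem.List.index? (ts.map (·.1)) a).getD 0 : Nat) : Int)))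
    ?_ ?_]
  · rw [List.flatMap_map]
    apply flatMap_congr_mem
    intro a ha
    congr 1
    apply List.filter_congr
    intro p hp
    rw [hk1 p]
    have hpm : p.1 ∈ ts.map (·.1) := List.mem_map.mpr ⟨p, hp, rfl⟩
    have ham : a ∈ ts.map (·.1) := (PySem.List.mem_dedup _ a).mp ha
    by_cases h : p.1 = a
    · simp [h]
    · have hne : (((PySem.List.index? (ts.map (·.1)) p.1).getD 0 : Nat) : Int)
          ≠ (((PySem.List.index? (ts.map (·.1)) a).getD 0 : Nat) : Int) := by
        intro he
        exact h (index?_getD_inj hpm ham (by exact_mod_cast he))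
      rw [beq_eq_false_iff_ne.mpr h, beq_eq_false_iff_ne.mpr hne]
  · rw [List.pairwise_map]
    refine List.Pairwise.imp ?_ (dedup_idx_pairwise (ts.map (·.1)))
    intro a b h
    exact_mod_cast h
  · intro p hp
    rw [hk1 p]
    exact List.mem_map.mpr ⟨p.1, (PySem.List.mem_dedup _ p.1).mpr (List.mem_map.mpr ⟨p, hp, rfl⟩), rfl⟩
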